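-- pv_equiv track=rewrite | github.com/FanghanHu/python-notes | practice/shuffle.py | fyShuffle
-- ===== SOURCE A (Python) =====
-- def swap(arr, i, j):
--     arr[i], arr[j] = arr[j], arr[i]
--
-- def fyStep(arr, i):
--     "simulate a step in Fisher-Yates shuffle, returning all possible results"
--     results = []
--     for j in range(0, i + 1):
--         copy = arr.copy()
--         swap(copy, j, i)
--         results.append(copy)
--     return results
--
-- def fyShuffle(arr):
--     "return all possible result of a Fisher-Yates shuffle"
--     result = [arr]
--     # 0 is omitted on purpose as it will always produce the same result as last step
--     for i in range(len(arr) - 1, 0, -1):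
--         temp = []
--         for tempArr in result:
--             temp.extend(fyStep(tempArr, i))
--         result = temp
--     return result
-- ===== SOURCE B (Python) =====
-- def _swapped(a, j, i):
--     copy = a.copy()
--     copy[j], copy[i] = copy[i], copy[j]
--     return copy
--
-- def fyShuffle(arr):
--     "return all possible result of a Fisher-Yates shuffle"
--     def rec(a, i):
--         if i <= 0:
--             return [a]
--         return [r for j in range(i + 1) for r in rec(_swapped(a, j, i), i - 1)]
--     return rec(arr, len(arr) - 1)
-- ===== Notes on version B (the rewrite author's own statement) =====
-- stated objective: alternative
-- what changed: Replaces the iterative breadth-first loop that rebuilds the whole result list level by level with a depth-first recursion on the step index that flattens per-prefix subresults directly.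
import Mathlib
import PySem

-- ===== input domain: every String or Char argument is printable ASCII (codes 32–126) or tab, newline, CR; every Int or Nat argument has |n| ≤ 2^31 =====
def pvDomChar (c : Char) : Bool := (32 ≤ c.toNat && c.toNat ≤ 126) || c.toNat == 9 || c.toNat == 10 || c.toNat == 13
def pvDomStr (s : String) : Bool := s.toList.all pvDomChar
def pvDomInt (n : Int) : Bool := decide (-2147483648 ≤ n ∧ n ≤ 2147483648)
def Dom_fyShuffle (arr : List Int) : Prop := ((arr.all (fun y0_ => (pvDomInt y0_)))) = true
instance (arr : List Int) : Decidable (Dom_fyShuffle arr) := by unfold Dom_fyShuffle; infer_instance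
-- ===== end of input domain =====

-- B replaces A's iterative level-by-level accumulator with a depth-first recursion on the step index (alternative decomposition, same cost).


-- ===== PORT A =====
-- swap(arr, i, j): arr[i], arr[j] = arr[j], arr[i].  The RHS tuple is read from the
-- original list, then arr[i] is assigned, then arr[j].  A only ever calls it with
-- in-range indices (every intermediate list keeps the input's length), so the total
-- forms pyGetD/pySetD are exact here.
def pvSwap (arr : List Int) (i j : Int) : List Int :=
  PySem.List.pySetD (PySem.List.pySetD arr i (PySem.List.pyGetD arr j 0)) j
    (PySem.List.pyGetD arr i 0)

-- fyStep(arr, i): for j in range(0, i+1): copy = arr.copy(); swap(copy, j, i); results.append(copy)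
def fyStep (arr : List Int) (i : Int) : List (List Int) :=
  (PySem.List.pyRange 0 (i + 1) 1).foldl (fun results j => results ++ [pvSwap arr j i]) []

def fyShuffle (arr : List Int) : List (List Int) :=
  (PySem.List.pyRange ((arr.length : Int) - 1) 0 (-1)).foldl
    (fun result i => result.foldl (fun temp tempArr => temp ++ fyStep tempArr i) [])
    [arr]

-- ===== PORT B =====
-- _swapped(a, j, i): copy = a.copy(); copy[j], copy[i] = copy[i], copy[j]; return copy.
-- B only indexes in range (j ≤ i ≤ len-1), so getD/set are exact here.
def swappedB (a : List Int) (j i : Nat) : List Int :=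
  (a.set j (a.getD i 0)).set i (a.getD j 0)

-- rec(a, i): [a] if i <= 0 else [r for j in range(i+1) for r in rec(_swapped(a,j,i), i-1)]
def fyRec (a : List Int) : Nat → List (List Int)
  | 0 => [a]
  | n + 1 => (List.range (n + 2)).flatMap (fun j => fyRec (swappedB a j (n + 1)) n)

def fyShuffle_alt (arr : List Int) : List (List Int) :=
  fyRec arr (arr.length - 1)

-- ===== PRECONDITION & SPEC =====
def Spec_fyShuffle (arr : List Int) (out : List (List Int)) : Prop := out = fyShuffle_alt arr
instance (arr : List Int) (out : List (List Int)) : Decidable (Spec_fyShuffle arr out) := by unfold Spec_fyShuffle; infer_instance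

-- ===== CLAIM (what is proved, stated in full; the proofs are below) =====
def Claim_equal_fyShuffle : Prop := ∀ (arr : List Int), Dom_fyShuffle arr → Spec_fyShuffle arr (fyShuffle arr)

-- ===== LEMMAS AND PROOFS =====

-- A's swap on cast (natural) indices is B's swap.
theorem pvSwap_natCast (a : List Int) (j i : Nat) :
    pvSwap a (j : Int) (i : Int) = swappedB a j i := by
  simp [pvSwap, swappedB, PySem.List.pySetD_natCast, PySem.List.pyGetD_natCast]

-- One level of A's fan-out, flattened through the rest of the recursion, is one step of fyRec.
theorem fyStep_flatMap_rec (a : List Int) (n : Nat) :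
    (fyStep a ((n + 1 : Nat) : Int)).flatMap (fun t => fyRec t n) = fyRec a (n + 1) := by
  have h1 : fyStep a ((n + 1 : Nat) : Int)
      = (List.range (n + 2)).map (fun j => swappedB a j (n + 1)) := by
    rw [fyStep, PySem.List.foldl_append_singleton_eq_map, PySem.List.pyRange_one, List.map_map,
        List.nil_append]
    have hn : ((((n + 1 : Nat) : Int) + 1) - 0).toNat = n + 2 := by push_cast; omega
    rw [hn]
    refine List.map_congr_left ?_
    intro k _
    have := pvSwap_natCast a k (n + 1)
    simpa [Function.comp] using this
  rw [h1, List.flatMap_map, fyRec]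

-- A's countdown fold over a whole level L equals flat-mapping fyRec over L.
theorem key (n : Nat) (L : List (List Int)) :
    (PySem.List.pyRange (n : Int) 0 (-1)).foldl
      (fun result i => result.foldl (fun temp tempArr => temp ++ fyStep tempArr i) []) L
    = L.flatMap (fun a => fyRec a n) := by
  induction n generalizing L with
  | zero =>
      rw [PySem.List.pyRange_neg_one_eq_nil (by norm_num)]
      simp [fyRec]
  | succ m ih =>
      rw [PySem.List.pyRange_neg_one_cons (by exact_mod_cast Nat.succ_pos m)]
      rw [List.foldl_cons, PySem.List.foldl_append_eq_flatMap]
      have hcast : ((m + 1 : Nat) : Int) - 1 = (m : Int) := by push_cast; ring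
      rw [List.nil_append, hcast, ih]
      rw [List.flatMap_assoc]
      refine List.flatMap_congr ?_
      intro a _
      exact fyStep_flatMap_rec a m

-- ===== VERDICT (by name: the statement is the Claim_ definition above) =====
theorem fyShuffle_spec : Claim_equal_fyShuffle := by
  intro arr _
  show fyShuffle arr = fyShuffle_alt arr
  rw [fyShuffle, fyShuffle_alt]
  cases arr with
  | nil => simp [PySem.List.pyRange_neg_one_eq_nil, fyRec]
  | cons x xs =>
      have hlen : ((x :: xs).length : Int) - 1 = ((x :: xs).length - 1 : Nat) := by
        simp
      rw [hlen, key]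
      simp
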